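-- pv_equiv track=rewrite | github.com/abharw/tp112 | src/traceCode.py | getIndentBody
-- ===== SOURCE A (Python) =====
-- def getIndentBody(lines):
--     body = []
--     currentLine = 0
--     # collect indented lines
--     while (currentLine < len(lines) and
--            (lines[currentLine].startswith(' ') or
--             lines[currentLine].startswith('\t'))):
--         body.append(lines[currentLine].strip())
--         currentLine += 1
--     # remaining lines are those after the block
--     restLines = lines[currentLine:]
--
--     return body, restLines
-- ===== SOURCE B (Python) =====
-- def getIndentBody(lines):
--     # Recursive decomposition: peel one indented line at a time, consing its
--     # stripped form onto the body returned by the recursive call on the tail.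
--     if lines and lines[0][:1] in (' ', '\t'):
--         body, rest = getIndentBody(lines[1:])
--         return [lines[0].strip()] + body, rest
--     return [], lines
-- ===== Notes on version B (the rewrite author's own statement) =====
-- stated objective: alternative
-- what changed: B is recursive on the list structure: it peels one indented line, recurses on the tail, and conses the stripped head onto the recursive body, instead of A's iterative index-while-loop that appends into an accumulator and slices the remainder afterwards.
import Mathlib
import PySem

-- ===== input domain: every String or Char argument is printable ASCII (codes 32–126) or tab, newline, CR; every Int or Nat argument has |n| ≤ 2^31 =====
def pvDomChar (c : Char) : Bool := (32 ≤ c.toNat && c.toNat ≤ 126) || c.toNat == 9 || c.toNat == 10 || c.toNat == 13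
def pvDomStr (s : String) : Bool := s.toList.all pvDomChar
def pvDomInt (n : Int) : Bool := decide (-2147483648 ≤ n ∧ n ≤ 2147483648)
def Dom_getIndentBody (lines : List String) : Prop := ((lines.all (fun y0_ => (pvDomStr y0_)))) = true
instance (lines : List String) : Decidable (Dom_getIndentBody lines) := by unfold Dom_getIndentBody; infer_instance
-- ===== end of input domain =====

-- B replaces A's index-while-loop with structural recursion that conses the stripped
-- head onto the recursive result; same cost, a different decomposition.

-- ===== PORT A =====
-- A's while-loop over currentLine, transcribed as recursion on the unread suffix with
-- the accumulated body as state; restLines is the remaining suffix.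
def pvA_go (body : List String) : List String → List String × List String
  | [] => (body, [])
  | l :: rest =>
    if PySem.Str.startswith l " " || PySem.Str.startswith l "\t" then
      pvA_go (body ++ [PySem.Str.strip l]) rest
    else (body, l :: rest)

def getIndentBody (lines : List String) : List String × List String :=
  pvA_go [] lines

-- ===== PORT B =====
-- Source B: if the first line's one-char prefix l[:1] is ' ' or '\t', recurse on the tail
-- and cons the stripped head onto the returned body; else ([], lines).
def getIndentBody_alt : List String → List String × List String
  | [] => ([], [])
  | l :: rest =>
    let h := String.ofList (l.toList.take 1)
    if h == " " || h == "\t" then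
      let (body, r) := getIndentBody_alt rest
      (PySem.Str.strip l :: body, r)
    else ([], l :: rest)

-- ===== PRECONDITION & SPEC =====
def Spec_getIndentBody (lines : List String) (out : List String × List String) : Prop := out = getIndentBody_alt lines
instance (lines : List String) (out : List String × List String) : Decidable (Spec_getIndentBody lines out) := by unfold Spec_getIndentBody; infer_instance

-- ===== CLAIM (what is proved, stated in full; the proofs are below) =====
def Claim_equal_getIndentBody : Prop := ∀ (lines : List String), Dom_getIndentBody lines → Spec_getIndentBody lines (getIndentBody lines)

-- ===== LEMMAS AND PROOFS =====

-- Bool equality of two one-character strings is equality of the characters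
theorem pvBeq_single (c d : Char) : (String.ofList [c] == String.ofList [d]) = (c == d) := by
  by_cases h : c = d
  · subst h; simp
  · have h2 : String.ofList [c] ≠ String.ofList [d] := by
      simpa [String.ofList_inj] using h
    simp [h, h2]

-- the two head tests agree: startswith a one-char pattern = the [:1] slice test
theorem pvIndent_test_eq (l : String) :
    (PySem.Str.startswith l " " || PySem.Str.startswith l "\t")
      = (String.ofList (l.toList.take 1) == " " || String.ofList (l.toList.take 1) == "\t") := by
  rcases hl : l.toList with _ | ⟨c, cs⟩
  · simp [PySem.Str.startswith, hl, PySem.Chars.startswith]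
  · simp [PySem.Str.startswith, hl, PySem.Chars.startswith, List.isPrefixOf]
    rw [show (" " : String) = String.ofList [' '] from rfl,
        show ("\t" : String) = String.ofList ['\t'] from rfl,
        pvBeq_single, pvBeq_single]
    simp [Bool.beq_comm]

-- A's accumulator recursion computes B's cons recursion prefixed by the accumulator
theorem pvA_go_eq (lines : List String) : ∀ (body : List String),
    pvA_go body lines = (body ++ (getIndentBody_alt lines).1, (getIndentBody_alt lines).2) := by
  induction lines with
  | nil => intro body; simp [pvA_go, getIndentBody_alt]
  | cons l rest ih =>
    intro body
    rw [pvA_go, pvIndent_test_eq l]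
    by_cases h : (String.ofList (l.toList.take 1) == " " || String.ofList (l.toList.take 1) == "\t") = true
    · rw [if_pos h, ih]
      simp [getIndentBody_alt, h]
    · rw [if_neg (by simp [h])]
      simp only [getIndentBody_alt]
      rw [if_neg (by simp_all)]
      simp

-- ===== VERDICT =====
theorem getIndentBody_spec : Claim_equal_getIndentBody := by
  intro lines _
  unfold Spec_getIndentBody getIndentBody
  simpa using pvA_go_eq lines []
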